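-- pv_equiv track=rewrite | github.com/Devang-25/Leetcode-3 | interviews/Palantir/sick_traverler_my_solution_v3.py | update_cities_status
-- ===== SOURCE A (Python) =====
-- from collections import defaultdict
-- from collections import defaultdict
--
-- def update_cities_status(names, people_health, location):
--     """
--     inputs:
--         names: [str]
--         people_health : [str]
--         location: [str]
--
--
--     output:
--         cities_status {city: status} : {str : str "G" or "B"}
--     """
--
--     cities_status = defaultdict(str)
--
--     for city in location:
--         cities_status[city] = "G"
--
--     for i, name in enumerate(names):
--         health = people_health[i]
--         city = location[i]
--
--         if cities_status[city] == "G" and (health != "HEALTHY"):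
--             cities_status[city] = "B"
--
--     return cities_status
-- ===== SOURCE B (Python) =====
-- from collections import defaultdict
--
--
-- def update_cities_status(names, people_health, location):
--     n = len(names)
--     cities_status = defaultdict(str)
--     for city in location:
--         if city not in cities_status:
--             cities_status[city] = "B" if any(
--                 location[i] == city and people_health[i] != "HEALTHY"
--                 for i in range(n)
--             ) else "G"
--     return cities_status
-- ===== Notes on version B (the rewrite author's own statement) =====
-- stated objective: alternative
-- what changed: B computes each city's status once, at its first occurrence, by an inner scan over all residents (any location[i]==city with unhealthy health), instead of A's two mutating passes (initialise every city to G, then conditionally flip to B while walking the people).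
import Mathlib
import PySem

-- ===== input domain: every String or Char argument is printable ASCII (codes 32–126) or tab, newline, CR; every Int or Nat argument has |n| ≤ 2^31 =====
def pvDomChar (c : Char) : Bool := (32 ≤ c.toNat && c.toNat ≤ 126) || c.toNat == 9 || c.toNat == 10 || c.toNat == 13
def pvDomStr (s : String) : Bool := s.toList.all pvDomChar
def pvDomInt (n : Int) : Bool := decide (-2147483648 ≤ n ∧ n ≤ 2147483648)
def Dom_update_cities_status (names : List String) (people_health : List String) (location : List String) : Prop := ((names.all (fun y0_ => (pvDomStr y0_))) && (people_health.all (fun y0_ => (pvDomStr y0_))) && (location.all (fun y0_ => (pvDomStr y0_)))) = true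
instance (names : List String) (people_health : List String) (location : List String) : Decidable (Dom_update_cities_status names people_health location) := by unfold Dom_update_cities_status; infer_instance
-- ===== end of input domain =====

-- B computes each city's status once, at its first occurrence, by an inner scan over all
-- residents, instead of A's two mutating passes (initialise every city to "G", then
-- conditionally flip to "B" while walking the people) (objective: alternative algorithm).


-- ===== PORT A =====
def update_cities_status (names : List String) (people_health : List String) (location : List String) : List (String × String) :=
  -- cities_status = defaultdict(str); for city in location: cities_status[city] = "G"
  let cities0 : PySem.Dict String String :=
    location.foldl (fun d city => d.insert city "G") PySem.Dict.empty
  -- for i, name in enumerate(names): health = people_health[i]; city = location[i]; …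
  -- (people_health[i] / location[i] raise IndexError when out of range: excluded by Pre_;
  --  the guard reads cities_status[city], here getD with defaultdict's "" default — within
  --  Pre_ city is always already a key, so the defaultdict insert-on-read is unobservable)
  let cities :=
    (PySem.List.enumerate names).foldl (fun d p =>
      match PySem.List.pyGet? people_health p.1, PySem.List.pyGet? location p.1 with
      | some health, some city =>
          if d.getD city "" = "G" ∧ health ≠ "HEALTHY" then d.insert city "B" else d
      | _, _ => d) cities0
  cities.items

-- ===== PORT B =====
def update_cities_status_alt (names : List String) (people_health : List String) (location : List String) : List (String × String) :=
  -- n = len(names); cities_status = defaultdict(str)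
  -- for city in location:
  --   if city not in cities_status:
  --     cities_status[city] = "B" if any(location[i] == city and people_health[i] != "HEALTHY"
  --                                      for i in range(n)) else "G"
  -- (location[i] / people_health[i] raise IndexError out of range: excluded by Pre_)
  let n := names.length
  let cities : PySem.Dict String String :=
    location.foldl (fun d city =>
      if d.contains city then d
      else d.insert city (if (List.range n).any (fun i =>
          match PySem.List.pyGet? location (i : Int) with
          | none => false
          | some c2 =>
            if c2 == city then
              match PySem.List.pyGet? people_health (i : Int) with
              | none => false
              | some h => !(h == "HEALTHY")
            else false) then "B" else "G")) PySem.Dict.empty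
  cities.items

-- ===== PRECONDITION & SPEC =====
-- A raises IndexError (people_health[i] or location[i]) exactly when names is longer than
-- either of the other two lists; those inputs are excluded.
def Pre_update_cities_status (names : List String) (people_health : List String) (location : List String) : Prop :=
  names.length ≤ people_health.length ∧ names.length ≤ location.length
instance (names : List String) (people_health : List String) (location : List String) : Decidable (Pre_update_cities_status names people_health location) := by unfold Pre_update_cities_status; infer_instance
def pvWitness_update_cities_status : List String × List String × List String :=
  (["ann", "bob"], ["HEALTHY", "SICK"], ["rome", "oslo", "rome"])
def Spec_update_cities_status (names : List String) (people_health : List String) (location : List String) (out : List (String × String)) : Prop := out = update_cities_status_alt names people_health location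
instance (names : List String) (people_health : List String) (location : List String) (out : List (String × String)) : Decidable (Spec_update_cities_status names people_health location out) := by unfold Spec_update_cities_status; infer_instance

-- ===== CLAIM (what is proved, stated in full; the proofs are below) =====
def Claim_equal_update_cities_status : Prop := ∀ (names : List String) (people_health : List String) (location : List String), Dom_update_cities_status names people_health location → Pre_update_cities_status names people_health location → Spec_update_cities_status names people_health location (update_cities_status names people_health location)

-- ===== LEMMAS AND PROOFS =====

-- first occurrences of the list not already in `seen`, in order
def pvFd (seen : List String) : List String → List String
  | [] => []
  | c :: cs => if c ∈ seen then pvFd seen cs else c :: pvFd (seen ++ [c]) cs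

-- "city has an unhealthy resident among the first n indexed people"
def pvBad (people_health location : List String) (n : Nat) (c : String) : Bool :=
  (List.range n).any (fun i => location.getD i "" == c && !(people_health.getD i "" == "HEALTHY"))

def pvF (people_health location : List String) (n : Nat) (c : String) : String :=
  if pvBad people_health location n c then "B" else "G"

-- a fold of unconditional inserts whose value depends only on the key yields the first-occurrence map
theorem pvFold_insert (f : String → String) :
    ∀ (loc l : List String),
      loc.foldl (fun d c => d.insert c (f c)) (PySem.Dict.mk (l.map (fun c => (c, f c)))) =
      PySem.Dict.mk ((l ++ pvFd l loc).map (fun c => (c, f c))) := by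
  intro loc
  induction loc with
  | nil => intro l; simp [pvFd]
  | cons c cs ih =>
    intro l
    simp only [List.foldl_cons, pvFd]
    by_cases h : c ∈ l
    · have hc : (PySem.Dict.mk (l.map (fun c => (c, f c)))).contains c = true := by
        rw [PySem.Dict.contains_iff_mem_keys, PySem.Dict.keys_mk]
        simp only [List.map_map]
        simpa [Function.comp] using h
      have heq : (PySem.Dict.mk (l.map (fun c => (c, f c)))).insert c (f c)
          = PySem.Dict.mk (l.map (fun c => (c, f c))) := by
        apply PySem.Dict.ext
        rw [PySem.Dict.items_insert_of_contains _ _ hc]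
        simp only [List.map_map]
        apply List.map_congr_left
        intro x _
        by_cases hx : x = c <;> simp [hx]
      rw [heq, ih l, if_pos h]
    · have hc : (PySem.Dict.mk (l.map (fun c => (c, f c)))).contains c = false := by
        rw [← Bool.not_eq_true, PySem.Dict.contains_iff_mem_keys, PySem.Dict.keys_mk]
        simp only [List.map_map]
        simpa [Function.comp] using h
      have heq : (PySem.Dict.mk (l.map (fun c => (c, f c)))).insert c (f c)
          = PySem.Dict.mk ((l ++ [c]).map (fun c => (c, f c))) := by
        apply PySem.Dict.ext
        rw [PySem.Dict.items_insert_of_not_contains _ _ hc]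
        simp
      rw [heq, ih (l ++ [c]), if_neg h]
      simp

-- B's fold of guarded inserts (skip keys already present) yields the same first-occurrence map
theorem pvFold_insertIfNew (f : String → String) :
    ∀ (loc l : List String),
      loc.foldl (fun d c => if d.contains c then d else d.insert c (f c))
        (PySem.Dict.mk (l.map (fun c => (c, f c)))) =
      PySem.Dict.mk ((l ++ pvFd l loc).map (fun c => (c, f c))) := by
  intro loc
  induction loc with
  | nil => intro l; simp [pvFd]
  | cons c cs ih =>
    intro l
    simp only [List.foldl_cons, pvFd]
    by_cases h : c ∈ l
    · have hc : (PySem.Dict.mk (l.map (fun c => (c, f c)))).contains c = true := by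
        rw [PySem.Dict.contains_iff_mem_keys, PySem.Dict.keys_mk]
        simp only [List.map_map]
        simpa [Function.comp] using h
      rw [hc]
      simp only [if_true]
      rw [ih l, if_pos h]
    · have hc : (PySem.Dict.mk (l.map (fun c => (c, f c)))).contains c = false := by
        rw [← Bool.not_eq_true, PySem.Dict.contains_iff_mem_keys, PySem.Dict.keys_mk]
        simp only [List.map_map]
        simpa [Function.comp] using h
      rw [hc]
      simp only [Bool.false_eq_true, if_false]
      have heq : (PySem.Dict.mk (l.map (fun c => (c, f c)))).insert c (f c)
          = PySem.Dict.mk ((l ++ [c]).map (fun c => (c, f c))) := by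
        apply PySem.Dict.ext
        rw [PySem.Dict.items_insert_of_not_contains _ _ hc]
        simp
      rw [heq, ih (l ++ [c]), if_neg h]
      simp

-- lookup in the first-occurrence map
theorem pvGetD_mk_map (f : String → String) (c d0 : String) :
    ∀ (l : List String),
      (PySem.Dict.mk (l.map (fun x => (x, f x)))).getD c d0 = if c ∈ l then f c else d0 := by
  intro l
  induction l with
  | nil => simp [PySem.Dict.getD_eq_get?_getD, PySem.Dict.get?]
  | cons a as ih =>
    rw [PySem.Dict.getD_eq_get?_getD] at *
    simp only [List.map_cons, PySem.Dict.get?_mk_cons]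
    by_cases h : a = c
    · subst h; simp
    · simp only [beq_iff_eq, if_neg h, List.mem_cons]
      rw [ih]
      have : ¬ c = a := fun hh => h hh.symm
      simp [this]

-- overwrite of an existing key in the first-occurrence map
theorem pvInsert_mk_map (f : String → String) (c v : String) (l : List String) (h : c ∈ l) :
    (PySem.Dict.mk (l.map (fun x => (x, f x)))).insert c v =
    PySem.Dict.mk (l.map (fun x => (x, if x = c then v else f x))) := by
  have hc : (PySem.Dict.mk (l.map (fun x => (x, f x)))).contains c = true := by
    rw [PySem.Dict.contains_iff_mem_keys, PySem.Dict.keys_mk]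
    simp only [List.map_map]
    simpa [Function.comp] using h
  apply PySem.Dict.ext
  rw [PySem.Dict.items_insert_of_contains _ _ hc]
  simp only [List.map_map]
  apply List.map_congr_left
  intro x _
  by_cases hx : x = c <;> simp [hx]

theorem pvFd_mem (c : String) :
    ∀ (loc seen : List String), c ∈ loc → c ∈ seen ∨ c ∈ pvFd seen loc := by
  intro loc
  induction loc with
  | nil => intro seen h; cases h
  | cons a as ih =>
    intro seen h
    by_cases ha : a ∈ seen
    · rcases List.mem_cons.mp h with rfl | h'
      · exact Or.inl ha
      · rcases ih seen h' with hs | hf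
        · exact Or.inl hs
        · exact Or.inr (by simp only [pvFd, if_pos ha]; exact hf)
    · rcases List.mem_cons.mp h with rfl | h'
      · exact Or.inr (by simp only [pvFd, if_neg ha]; exact List.mem_cons_self)
      · rcases ih (seen ++ [a]) h' with hs | hf
        · rcases List.mem_append.mp hs with h1 | h2
          · exact Or.inl h1
          · simp only [List.mem_singleton] at h2
            exact Or.inr (by simp only [pvFd, if_neg ha]; exact h2 ▸ List.mem_cons_self)
        · exact Or.inr (by simp only [pvFd, if_neg ha]; exact List.mem_cons_of_mem _ hf)

theorem pvBad_succ (people_health location : List String) (n : Nat)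
    (h1 : n < people_health.length) (h2 : n < location.length) (c : String) :
    pvBad people_health location (n + 1) c =
      (pvBad people_health location n c ||
        (location[n] == c && !(people_health[n] == "HEALTHY"))) := by
  simp [pvBad, List.range_succ, List.getD_eq_getElem?_getD, h1, h2]

-- the step-function of A's second loop, named for the proofs (definitionally the port's lambda)
def pvStepA (people_health location : List String) (d : PySem.Dict String String) (p : Int × String) : PySem.Dict String String :=
  match PySem.List.pyGet? people_health p.1, PySem.List.pyGet? location p.1 with
  | some health, some city =>
      if d.getD city "" = "G" ∧ health ≠ "HEALTHY" then d.insert city "B" else d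
  | _, _ => d

theorem pvPhase2 (people_health location : List String) :
    ∀ (names : List String), names.length ≤ people_health.length → names.length ≤ location.length →
      (PySem.List.enumerate names).foldl (pvStepA people_health location)
        (PySem.Dict.mk ((pvFd [] location).map (fun c => (c, "G")))) =
      PySem.Dict.mk ((pvFd [] location).map
        (fun c => (c, pvF people_health location names.length c))) := by
  intro names
  induction names using List.reverseRecOn with
  | nil =>
    intro _ _
    simp [PySem.List.enumerate_nil, pvF, pvBad]
  | append_singleton xs x ih =>
    intro h1 h2
    simp only [List.length_append, List.length_cons, List.length_nil, Nat.zero_add] at h1 h2 ⊢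
    have hx1 : xs.length < people_health.length := by omega
    have hx2 : xs.length < location.length := by omega
    rw [PySem.List.enumerate_append, List.foldl_append, ih (by omega) (by omega)]
    simp only [PySem.List.enumerate, List.foldl_cons, List.foldl_nil]
    have hph : PySem.List.pyGet? people_health ((0:Int) + xs.length) = some people_health[xs.length] := by
      simp [pysem, hx1]
    have hloc : PySem.List.pyGet? location ((0:Int) + xs.length) = some location[xs.length] := by
      simp [pysem, hx2]
    rw [pvStepA]
    simp only [hph, hloc]
    have hmemfd : location[xs.length] ∈ pvFd [] location :=
      (pvFd_mem _ location [] (List.getElem_mem _)).resolve_left (by simp)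
    have hgd : (PySem.Dict.mk ((pvFd [] location).map
        (fun c => (c, pvF people_health location xs.length c)))).getD location[xs.length] ""
        = pvF people_health location xs.length location[xs.length] := by
      rw [pvGetD_mk_map, if_pos hmemfd]
    by_cases hh : people_health[xs.length] = "HEALTHY"
    · -- healthy resident: guard false, bad set unchanged
      rw [if_neg (fun hand => hand.2 hh)]
      congr 1
      apply List.map_congr_left
      intro c _
      rw [pvF, pvF, pvBad_succ people_health location xs.length hx1 hx2 c]
      simp [hh]
    · by_cases hg : pvBad people_health location xs.length location[xs.length] = true
      · -- city already marked "B": guard false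
        have hng : ¬ ((PySem.Dict.mk ((pvFd [] location).map
            (fun c => (c, pvF people_health location xs.length c)))).getD location[xs.length] "" = "G"
            ∧ people_health[xs.length] ≠ "HEALTHY") := by
          rw [hgd]; intro hand; rw [pvF, if_pos hg] at hand; exact absurd hand.1 (by decide)
        rw [if_neg hng]
        congr 1
        apply List.map_congr_left
        intro c _
        rw [pvF, pvF, pvBad_succ people_health location xs.length hx1 hx2 c]
        by_cases hc : location[xs.length] = c
        · subst hc; simp [hg]
        · simp [hc]
      · -- newly bad city: guard true, flipped to "B"
        have hpg : ((PySem.Dict.mk ((pvFd [] location).map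
            (fun c => (c, pvF people_health location xs.length c)))).getD location[xs.length] "" = "G"
            ∧ people_health[xs.length] ≠ "HEALTHY") := by
          rw [hgd]; exact ⟨by simp [pvF, hg], hh⟩
        rw [if_pos hpg, pvInsert_mk_map _ _ _ _ hmemfd]
        congr 1
        apply List.map_congr_left
        intro c _
        simp only [pvF]
        rw [pvBad_succ people_health location xs.length hx1 hx2 c]
        by_cases hc : c = location[xs.length]
        · subst hc; simp [hh]
        · have hc' : ¬ location[xs.length] = c := fun e => hc (Eq.symm e)
          simp [hc, hc']

-- B's inner per-city `any` over the residents computes exactly pvBad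
theorem pvAny_eq_pvBad (people_health location : List String) (c : String) :
    ∀ (n : Nat), n ≤ people_health.length → n ≤ location.length →
      ((List.range n).any (fun i =>
        match PySem.List.pyGet? location (i : Int) with
        | none => false
        | some c2 =>
          if c2 == c then
            match PySem.List.pyGet? people_health (i : Int) with
            | none => false
            | some h => !(h == "HEALTHY")
          else false)) = pvBad people_health location n c := by
  intro n
  induction n with
  | zero => intro _ _; simp [pvBad]
  | succ m ih =>
    intro h1 h2
    have hx1 : m < people_health.length := by omega
    have hx2 : m < location.length := by omega
    rw [List.range_succ, List.any_append, ih (by omega) (by omega),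
      pvBad_succ people_health location m hx1 hx2 c]
    simp [hx1, hx2]
    by_cases hc : location[m] = c <;> simp [hc]

-- ===== VERDICT (by name: the statement is the Claim_ definition above) =====
theorem update_cities_status_spec : Claim_equal_update_cities_status := by
  intro names people_health location _ hpre
  obtain ⟨h1, h2⟩ := hpre
  unfold Spec_update_cities_status update_cities_status update_cities_status_alt
  have hA0 : location.foldl (fun d city => d.insert city "G") PySem.Dict.empty
      = PySem.Dict.mk ((pvFd [] location).map (fun c => (c, "G"))) :=
    pvFold_insert (fun _ => "G") location []
  have hA2 : (PySem.List.enumerate names).foldl (fun d (p : Int × String) =>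
      match PySem.List.pyGet? people_health p.1, PySem.List.pyGet? location p.1 with
      | some health, some city =>
          if d.getD city "" = "G" ∧ health ≠ "HEALTHY" then d.insert city "B" else d
      | _, _ => d) (PySem.Dict.mk ((pvFd [] location).map (fun c => (c, "G"))))
      = PySem.Dict.mk ((pvFd [] location).map
          (fun c => (c, pvF people_health location names.length c))) :=
    pvPhase2 people_health location names h1 h2
  have hB : location.foldl (fun d city =>
      if d.contains city then d
      else d.insert city (if (List.range names.length).any (fun i =>
          match PySem.List.pyGet? location (i : Int) with
          | none => false
          | some c2 =>
            if c2 == city then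
              match PySem.List.pyGet? people_health (i : Int) with
              | none => false
              | some h => !(h == "HEALTHY")
            else false) then "B" else "G")) PySem.Dict.empty
      = PySem.Dict.mk ((pvFd [] location).map (fun c => (c,
          if (List.range names.length).any (fun i =>
            match PySem.List.pyGet? location (i : Int) with
            | none => false
            | some c2 =>
              if c2 == c then
                match PySem.List.pyGet? people_health (i : Int) with
                | none => false
                | some h => !(h == "HEALTHY")
              else false) then "B" else "G"))) :=
    pvFold_insertIfNew _ location []
  simp only [hA0, hA2, hB]
  apply List.map_congr_left
  intro c _
  rw [pvAny_eq_pvBad people_health location c names.length h1 h2, pvF]
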